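-- pv_equiv track=rewrite | github.com/wzgrx/ComfyUI-Apt_Preset | NodeCollect/text_font2img.py | cumulative_text
-- ===== SOURCE A (Python) =====
-- def cumulative_text(frame_text_dict, frame_count):
--     cumulative_text_dict = {}
--     last_text = ""
--     for i in range(1, frame_count + 1):
--         if str(i) in frame_text_dict:
--             last_text = frame_text_dict[str(i)]
--         cumulative_text_dict[str(i)] = last_text
--     return cumulative_text_dict
-- ===== SOURCE B (Python) =====
-- def cumulative_text(frame_text_dict, frame_count):
--     # breakpoints: frame indices whose str form is a key; then fill segments between them
--     breaks = [i for i in range(1, frame_count + 1) if str(i) in frame_text_dict]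
--     out = {}
--     prev = 1
--     text = ""
--     for b in breaks:
--         for j in range(prev, b):
--             out[str(j)] = text
--         prev = b
--         text = frame_text_dict[str(b)]
--     for j in range(prev, frame_count + 1):
--         out[str(j)] = text
--     return out
-- ===== Notes on version B (the rewrite author's own statement) =====
-- stated objective: alternative
-- what changed: A carries last_text index-by-index through one loop over all frames; B first collects the ordered breakpoint indices (frames whose str(i) is a key) and then assembles the dict by filling whole half-open segments between consecutive breakpoints, with an empty-text prefix before the first one.
import Mathlib
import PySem

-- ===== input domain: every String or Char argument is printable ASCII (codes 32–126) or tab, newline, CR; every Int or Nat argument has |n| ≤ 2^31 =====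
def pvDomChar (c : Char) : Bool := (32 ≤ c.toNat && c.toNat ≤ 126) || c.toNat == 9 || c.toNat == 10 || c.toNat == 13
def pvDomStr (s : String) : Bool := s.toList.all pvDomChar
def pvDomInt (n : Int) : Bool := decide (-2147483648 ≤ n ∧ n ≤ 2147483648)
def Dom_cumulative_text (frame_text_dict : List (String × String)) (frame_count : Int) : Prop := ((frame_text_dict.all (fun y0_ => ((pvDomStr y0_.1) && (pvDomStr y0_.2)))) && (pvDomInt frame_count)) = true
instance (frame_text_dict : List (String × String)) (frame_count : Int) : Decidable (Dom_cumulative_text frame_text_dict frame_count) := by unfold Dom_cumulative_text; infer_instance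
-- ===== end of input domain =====

-- B replaces A's per-index carry loop by a breakpoint-then-segment-fill decomposition (objective: alternative, same cost).

-- shared helper: Python dict assignment 'd[k] = v' on an assoc list (overwrite first match in place, else append)
def pySetItem : List (String × String) → String → String → List (String × String)
  | [], k, v => [(k, v)]
  | (a, b) :: t, k, v => if a == k then (k, v) :: t else (a, b) :: pySetItem t k v

-- ===== PORT A =====
-- one loop step of A: maybe update last_text, then assign cumulative_text_dict[str(i)]
def ctStepA (fd : List (String × String)) (st : List (String × String) × String) (i : Int) :
    List (String × String) × String :=
  let key := PySem.Int.toStr i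
  match fd.lookup key with
  | some v => (pySetItem st.1 key v, v)
  | none => (pySetItem st.1 key st.2, st.2)

def cumulative_text (frame_text_dict : List (String × String)) (frame_count : Int) : List (String × String) :=
  ((PySem.List.pyRange 1 (frame_count + 1) 1).foldl (ctStepA frame_text_dict) ([], "")).1

-- ===== PORT B =====
-- inner fill loop: 'for j in range(a, b): out[str(j)] = t'
def ctFill (d : List (String × String)) (a b : Int) (t : String) : List (String × String) :=
  (PySem.List.pyRange a b 1).foldl (fun o j => pySetItem o (PySem.Int.toStr j) t) d

-- one step of B's loop over breakpoints; getD's "" default is unreachable (b is a breakpoint, so the key is present)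
def ctStepB (fd : List (String × String)) (st : List (String × String) × Int × String) (b : Int) :
    List (String × String) × Int × String :=
  (ctFill st.1 st.2.1 b st.2.2, b, (fd.lookup (PySem.Int.toStr b)).getD "")

def cumulative_text_alt (frame_text_dict : List (String × String)) (frame_count : Int) : List (String × String) :=
  let breaks := (PySem.List.pyRange 1 (frame_count + 1) 1).filter
      (fun i => (frame_text_dict.lookup (PySem.Int.toStr i)).isSome)
  let st := breaks.foldl (ctStepB frame_text_dict) ([], 1, "")
  ctFill st.1 st.2.1 (frame_count + 1) st.2.2

-- ===== PRECONDITION & SPEC =====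
def Spec_cumulative_text (frame_text_dict : List (String × String)) (frame_count : Int) (out : List (String × String)) : Prop := out = cumulative_text_alt frame_text_dict frame_count
instance (frame_text_dict : List (String × String)) (frame_count : Int) (out : List (String × String)) : Decidable (Spec_cumulative_text frame_text_dict frame_count out) := by unfold Spec_cumulative_text; infer_instance

-- ===== CLAIM (what is proved, stated in full; the proofs are below) =====
def Claim_equal_cumulative_text : Prop := ∀ (frame_text_dict : List (String × String)) (frame_count : Int), Dom_cumulative_text frame_text_dict frame_count → Spec_cumulative_text frame_text_dict frame_count (cumulative_text frame_text_dict frame_count)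

-- ===== LEMMAS AND PROOFS =====

-- A's loop state after processing frames 1..m
def stA (fd : List (String × String)) (m : Int) : List (String × String) × String :=
  (PySem.List.pyRange 1 (m + 1) 1).foldl (ctStepA fd) ([], "")

-- B's state after its breakpoint loop on breakpoints up to m
def stB (fd : List (String × String)) (m : Int) : List (String × String) × Int × String :=
  ((PySem.List.pyRange 1 (m + 1) 1).filter
      (fun i => (fd.lookup (PySem.Int.toStr i)).isSome)).foldl (ctStepB fd) ([], 1, "")

lemma ctFill_split (d : List (String × String)) (a b c : Int) (t : String)
    (h1 : a ≤ b) (h2 : b ≤ c) :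
    ctFill d a c t = ctFill (ctFill d a b t) b c t := by
  unfold ctFill
  rw [PySem.List.pyRange_one_append a b c h1 h2, List.foldl_append]

lemma ctFill_singleton (d : List (String × String)) (a : Int) (t : String) :
    ctFill d a (a + 1) t = pySetItem d (PySem.Int.toStr a) t := by
  unfold ctFill
  rw [PySem.List.pyRange_one_singleton]
  rfl

lemma key_invariant (fd : List (String × String)) (n : Nat) :
    (stA fd n).2 = (stB fd n).2.2 ∧
    1 ≤ (stB fd n).2.1 ∧ (stB fd n).2.1 ≤ (n : Int) + 1 ∧
    (stA fd n).1 = ctFill (stB fd n).1 (stB fd n).2.1 ((n : Int) + 1) (stB fd n).2.2 := by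
  induction n with
  | zero =>
    refine ⟨rfl, le_refl _, le_refl _, ?_⟩
    simp [stA, stB, ctFill, PySem.List.pyRange_one_eq_nil]
  | succ n ih =>
    obtain ⟨h2, hp1, hp2, h1⟩ := ih
    simp only [Nat.cast_add, Nat.cast_one]
    have hr : PySem.List.pyRange 1 (((n : Int) + 1) + 1) 1
        = PySem.List.pyRange 1 ((n : Int) + 1) 1 ++ [(n : Int) + 1] := by
      exact PySem.List.pyRange_one_succ_right (by omega)
    have hA : stA fd ((n : Nat) + 1) = ctStepA fd (stA fd n) ((n : Int) + 1) := by
      unfold stA; rw [hr, List.foldl_append]; rfl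
    have hBr : stB fd ((n : Nat) + 1)
        = ((PySem.List.pyRange 1 ((n : Int) + 1) 1
            ++ [(n : Int) + 1]).filter
              (fun i => (fd.lookup (PySem.Int.toStr i)).isSome)).foldl (ctStepB fd) ([], 1, "") := by
      unfold stB; rw [hr]
    cases hmem : (fd.lookup (PySem.Int.toStr ((n : Int) + 1))) with
    | some v =>
      have hB : stB fd ((n : Nat) + 1) = ctStepB fd (stB fd n) ((n : Int) + 1) := by
        rw [hBr, List.filter_append, List.foldl_append]
        simp [hmem, stB]
      have hA' : stA fd ((n : Nat) + 1)
          = (pySetItem (stA fd n).1 (PySem.Int.toStr ((n : Int) + 1)) v, v) := by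
        rw [hA]; unfold ctStepA; simp [hmem]
      refine ⟨?_, ?_, ?_, ?_⟩
      · rw [hA', hB]; simp [ctStepB, hmem]
      · rw [hB]; simp [ctStepB]
      · rw [hB]; simp [ctStepB]
      · rw [hA', hB]
        simp only [ctStepB, hmem, Option.getD_some]
        rw [ctFill_singleton, ← h1]
    | none =>
      have hB : stB fd ((n : Nat) + 1) = stB fd n := by
        rw [hBr, List.filter_append, List.foldl_append]
        simp [hmem, stB]
      have hA' : stA fd ((n : Nat) + 1)
          = (pySetItem (stA fd n).1 (PySem.Int.toStr ((n : Int) + 1)) (stA fd n).2, (stA fd n).2) := by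
        rw [hA]; unfold ctStepA; simp [hmem]
      refine ⟨?_, ?_, ?_, ?_⟩
      · rw [hA', hB]; exact h2
      · rw [hB]; exact hp1
      · rw [hB]; omega
      · rw [hA', hB]
        rw [ctFill_split (stB fd n).1 (stB fd n).2.1 ((n : Int) + 1) (((n : Int) + 1) + 1)
              (stB fd n).2.2 hp2 (by omega)]
        rw [ctFill_singleton, ← h1, h2]

lemma equal_of_nonneg (fd : List (String × String)) (fc : Int) (h : 0 ≤ fc) :
    cumulative_text fd fc = cumulative_text_alt fd fc := by
  obtain ⟨n, rfl⟩ : ∃ n : Nat, fc = (n : Int) := ⟨fc.toNat, (Int.toNat_of_nonneg h).symm⟩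
  obtain ⟨_, _, _, h1⟩ := key_invariant fd n
  show (stA fd n).1 = _
  rw [h1]
  rfl

lemma equal_of_neg (fd : List (String × String)) (fc : Int) (h : fc < 0) :
    cumulative_text fd fc = cumulative_text_alt fd fc := by
  have hnil : PySem.List.pyRange 1 (fc + 1) 1 = [] :=
    PySem.List.pyRange_one_eq_nil (by omega)
  show ((PySem.List.pyRange 1 (fc + 1) 1).foldl (ctStepA fd) ([], "")).1 = _
  unfold cumulative_text_alt ctFill
  simp [hnil]

-- ===== VERDICT (by name: the statement is the Claim_ definition above) =====
theorem cumulative_text_spec : Claim_equal_cumulative_text := by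
  intro fd fc _
  show cumulative_text fd fc = cumulative_text_alt fd fc
  rcases lt_or_ge fc 0 with h | h
  · exact equal_of_neg fd fc h
  · exact equal_of_nonneg fd fc h
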